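-- pv_equiv track=rewrite | github.com/alexandraback/datacollection | solutions_5631989306621952_1/Python/halucinka/A.py | vratSlovo2
-- ===== SOURCE A (Python) =====
-- def najdiMax(slovo):
--     max_index = 0
--     for i in range(0, len(slovo)):
--         if (slovo[i] >= slovo[max_index]):
--             max_index = i
--     return max_index
--
-- def vratSlovo2(slovo):
--     prefix = ''
--     sufix = ''
--     while (len(slovo)> 0):
--         max_index = najdiMax(slovo)
--         prefix += slovo[max_index]
--         sufix = slovo[max_index+1:] + sufix
--         slovo = slovo[:max_index]
--     return prefix + sufix
-- ===== SOURCE B (Python) =====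
-- def vratSlovo2(slovo):
--     # One pass: left-to-right maxima (ties count as new maxima) are the chars A picks,
--     # in reverse; all other chars follow in original order.
--     records = []
--     rest = []
--     best = None
--     for c in slovo:
--         if best is None or c >= best:
--             records.append(c)
--             best = c
--         else:
--             rest.append(c)
--     return ''.join(reversed(records)) + ''.join(rest)
-- ===== Notes on version B (the rewrite author's own statement) =====
-- stated objective: faster
-- what changed: Replaces the repeated last-argmax scan over shrinking slices with a single left-to-right pass that classifies each character as a running maximum (record) or not, returning reversed records followed by the non-records in order.
import Mathlib
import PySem

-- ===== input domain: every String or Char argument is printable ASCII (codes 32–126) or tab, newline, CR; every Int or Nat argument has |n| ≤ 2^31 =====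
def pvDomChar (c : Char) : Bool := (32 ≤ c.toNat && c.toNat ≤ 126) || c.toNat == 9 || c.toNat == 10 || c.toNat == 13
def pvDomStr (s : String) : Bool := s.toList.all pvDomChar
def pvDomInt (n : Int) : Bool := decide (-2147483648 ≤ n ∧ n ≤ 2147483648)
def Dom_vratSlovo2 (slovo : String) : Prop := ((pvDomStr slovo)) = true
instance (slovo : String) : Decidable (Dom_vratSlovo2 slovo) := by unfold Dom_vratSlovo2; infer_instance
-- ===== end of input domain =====

-- B replaces A's repeated last-argmax scan over shrinking slices (O(n^2)) with one
-- left-to-right pass collecting running maxima; objective: faster (asymptotic).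

-- ===== PORT A =====
-- najdiMax: fold over range(0, len); all indexing is in range, so getD is exact.
def pvNajdiMax (l : List Char) : Nat :=
  (List.range l.length).foldl
    (fun max_index i => if l.getD i ' ' ≥ l.getD max_index ' ' then i else max_index) 0

-- termination helper for the while-loop port (cited by decreasing_by)
theorem pvNajdiMax_lt (l : List Char) (h : 0 < l.length) : pvNajdiMax l < l.length := by
  unfold pvNajdiMax
  have aux : ∀ (is : List Nat) (a : Nat), a < l.length → (∀ i ∈ is, i < l.length) →
      is.foldl (fun max_index i => if l.getD i ' ' ≥ l.getD max_index ' ' then i else max_index) a < l.length := by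
    intro is
    induction is with
    | nil => intro a ha _; simpa using ha
    | cons i is ih =>
      intro a ha hmem
      simp only [List.foldl_cons]
      split
      · exact ih _ (hmem i (by simp)) (fun j hj => hmem j (by simp [hj]))
      · exact ih _ ha (fun j hj => hmem j (by simp [hj]))
  exact aux _ 0 h (by intro i hi; simpa using hi)

-- the while-loop of vratSlovo2: state (slovo, prefix, sufix); slices are nonnegative, exact
def pvLoopA : List Char → List Char → List Char → List Char
  | slovo, pfx, sfx =>
    if h : 0 < slovo.length then  -- h used by decreasing_by
      let m := pvNajdiMax slovo
      pvLoopA (slovo.take m) (pfx ++ [slovo.getD m ' ']) (slovo.drop (m + 1) ++ sfx)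
    else pfx ++ sfx
termination_by slovo _ _ => slovo.length
decreasing_by
  simp only [List.length_take]
  exact lt_of_le_of_lt (min_le_left _ _) (pvNajdiMax_lt slovo h)

def vratSlovo2 (slovo : String) : String := String.mk (pvLoopA slovo.toList [] [])

-- ===== PORT B =====
-- one step of B's for-loop over the characters: state (records, rest, best)
def pvStepB (p : List Char × List Char × Option Char) (c : Char) :
    List Char × List Char × Option Char :=
  match p with
  | (records, rest, none) => (records ++ [c], rest, some c)
  | (records, rest, some b) =>
      if c ≥ b then (records ++ [c], rest, some c) else (records, rest ++ [c], some b)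

def vratSlovo2_alt (slovo : String) : String :=
  let t := slovo.toList.foldl pvStepB ([], [], none)
  String.mk (t.1.reverse ++ t.2.1)

-- ===== PRECONDITION & SPEC =====
def Spec_vratSlovo2 (slovo : String) (out : String) : Prop := out = vratSlovo2_alt slovo
instance (slovo : String) (out : String) : Decidable (Spec_vratSlovo2 slovo out) := by unfold Spec_vratSlovo2; infer_instance

-- ===== CLAIM (what is proved, stated in full; the proofs are below) =====
def Claim_equal_vratSlovo2 : Prop := ∀ (slovo : String), Dom_vratSlovo2 slovo → Spec_vratSlovo2 slovo (vratSlovo2 slovo)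

-- ===== LEMMAS AND PROOFS =====

/-- Recursive form of B's pass: (records, rest, final best) from a given current best. -/
def runB : List Char → Option Char → List Char × List Char × Option Char
  | [], b => ([], [], b)
  | c :: cs, none =>
      let r := runB cs (some c); (c :: r.1, r.2.1, r.2.2)
  | c :: cs, some b =>
      if b ≤ c then let r := runB cs (some c); (c :: r.1, r.2.1, r.2.2)
      else let r := runB cs (some b); (r.1, c :: r.2.1, r.2.2)

theorem foldB_eq (l : List Char) : ∀ (recs rest : List Char) (b? : Option Char),
    l.foldl pvStepB (recs, rest, b?) =
      (recs ++ (runB l b?).1, rest ++ (runB l b?).2.1, (runB l b?).2.2) := by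
  induction l with
  | nil => intro recs rest b?; simp [runB]
  | cons c cs ih =>
    intro recs rest b?
    match b? with
    | none => simp [pvStepB, runB, ih]
    | some b =>
      by_cases hb : b ≤ c
      · simp [pvStepB, runB, hb, ge_iff_le, ih]
      · simp [pvStepB, runB, hb, ge_iff_le, ih]

/-- If every element is below the running best, nothing more is a record. -/
theorem runB_allsmall (r : List Char) : ∀ (b : Char), (∀ x ∈ r, ¬ b ≤ x) →
    runB r (some b) = ([], r, some b) := by
  induction r with
  | nil => intro b _; simp [runB]
  | cons c cs ih =>
    intro b h
    have hc : ¬ b ≤ c := h c (by simp)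
    simp [runB, hc, ih b (fun x hx => h x (by simp [hx]))]

/-- Decomposition: with t all ≤ c, r all < c, and current best ≤ c,
    c is the last record and everything after it is non-record. -/
theorem runB_decomp (t : List Char) : ∀ (c : Char) (r : List Char) (b? : Option Char),
    (∀ x ∈ t, x ≤ c) → (∀ x ∈ r, x < c) → (∀ b, b? = some b → b ≤ c) →
    (runB (t ++ c :: r) b?).1 = (runB t b?).1 ++ [c] ∧
    (runB (t ++ c :: r) b?).2.1 = (runB t b?).2.1 ++ r := by
  induction t with
  | nil =>
    intro c r b? _ hr hb
    have hrr : runB r (some c) = ([], r, some c) :=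
      runB_allsmall r c (fun x hx => not_le.mpr (hr x hx))
    match b? with
    | none => simp [runB, hrr]
    | some b => simp [runB, hb b rfl, hrr]
  | cons a t ih =>
    intro c r b? ht hr hb
    have ha : a ≤ c := ht a (by simp)
    have ht' : ∀ x ∈ t, x ≤ c := fun x hx => ht x (by simp [hx])
    match b? with
    | none =>
      have := ih c r (some a) ht' hr (by intro b hb'; cases hb'; exact ha)
      simp only [List.cons_append, runB]
      exact ⟨by simp [this.1], by simp [this.2]⟩
    | some b =>
      have hbc : b ≤ c := hb b rfl
      by_cases hba : b ≤ a
      · have := ih c r (some a) ht' hr (by intro b' hb'; cases hb'; exact ha)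
        simp only [List.cons_append, runB, hba, if_true]
        exact ⟨by simp [this.1], by simp [this.2]⟩
      · have := ih c r (some b) ht' hr (by intro b' hb'; cases hb'; exact hbc)
        simp only [List.cons_append, runB, hba, if_false]
        exact ⟨by simp [this.1], by simp [this.2]⟩

/-- najdiMax returns the index of the last maximum. -/
theorem pvNajdiMax_spec (l : List Char) (hl : 0 < l.length) :
    pvNajdiMax l < l.length ∧
    (∀ j, j < l.length → l.getD j ' ' ≤ l.getD (pvNajdiMax l) ' ') ∧
    (∀ j, pvNajdiMax l < j → j < l.length → l.getD j ' ' < l.getD (pvNajdiMax l) ' ') := by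
  unfold pvNajdiMax
  set f : Nat → Nat → Nat :=
    fun max_index i => if l.getD i ' ' ≥ l.getD max_index ' ' then i else max_index with hf
  have key : ∀ k, 0 < k → k ≤ l.length →
      ((List.range k).foldl f 0 < k ∧
       (∀ j, j < k → l.getD j ' ' ≤ l.getD ((List.range k).foldl f 0) ' ') ∧
       (∀ j, (List.range k).foldl f 0 < j → j < k → l.getD j ' ' < l.getD ((List.range k).foldl f 0) ' ')) := by
    intro k
    induction k with
    | zero => intro h; omega
    | succ k ih =>
      intro _ hk
      rcases Nat.eq_zero_or_pos k with hk0 | hkpos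
      · subst hk0
        have : (List.range 1).foldl f 0 = 0 := by simp [hf]
        rw [this]
        refine ⟨by omega, ?_, ?_⟩
        · intro j hj; interval_cases j; exact le_refl _
        · intro j h1 h2; omega
      · obtain ⟨hm, hle, hlt⟩ := ih hkpos (by omega)
        set m := (List.range k).foldl f 0 with hmdef
        have step : (List.range (k + 1)).foldl f 0 = f m k := by
          rw [List.range_succ, List.foldl_append, ← hmdef]; simp
        rw [step]
        by_cases hc : l.getD k ' ' ≥ l.getD m ' '
        · have : f m k = k := by simp only [hf]; exact if_pos hc
          rw [this]
          refine ⟨by omega, ?_, ?_⟩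
          · intro j hj
            rcases Nat.lt_or_ge j k with h | h
            · exact le_trans (hle j h) hc
            · have : j = k := by omega
              subst this; exact le_refl _
          · intro j h1 h2; omega
        · have : f m k = m := by simp only [hf]; exact if_neg hc
          rw [this]
          refine ⟨by omega, ?_, ?_⟩
          · intro j hj
            rcases Nat.lt_or_ge j k with h | h
            · exact hle j h
            · have : j = k := by omega
              subst this; exact (not_le.mp hc).le
          · intro j h1 h2
            rcases Nat.lt_or_ge j k with h | h
            · exact hlt j h1 h
            · have : j = k := by omega
              subst this; exact not_le.mp hc
  exact key l.length hl (le_refl _)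

theorem getD_eq (l : List Char) (j : Nat) (hj : j < l.length) : l.getD j ' ' = l[j] := by
  simp [List.getD_eq_getElem?_getD, List.getElem?_eq_getElem hj]

/-- A's loop computes B's answer, for any accumulators. -/
theorem loopA_eq (n : Nat) : ∀ (l pfx sfx : List Char), l.length ≤ n →
    pvLoopA l pfx sfx = pfx ++ (runB l none).1.reverse ++ ((runB l none).2.1 ++ sfx) := by
  induction n with
  | zero =>
    intro l pfx sfx hn
    have : l = [] := List.length_eq_zero_iff.mp (by omega)
    subst this
    rw [pvLoopA]
    simp [runB]
  | succ n ih =>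
    intro l pfx sfx hn
    rcases Nat.eq_zero_or_pos l.length with h0 | hpos
    · have : l = [] := List.length_eq_zero_iff.mp h0
      subst this
      rw [pvLoopA]
      simp [runB]
    · obtain ⟨hm, hle, hlt⟩ := pvNajdiMax_spec l hpos
      set m := pvNajdiMax l with hmdef
      have hsplit : l.take m ++ l.getD m ' ' :: l.drop (m + 1) = l := by
        rw [getD_eq l m hm]
        rw [List.getElem_cons_drop]
        exact List.take_append_drop m l
      have ht : ∀ x ∈ l.take m, x ≤ l.getD m ' ' := by
        intro x hx
        obtain ⟨j, hj, hx'⟩ := List.getElem_of_mem hx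
        have hjm : j < m := by simp [List.length_take] at hj; omega
        have hjl : j < l.length := by omega
        have hx2 : x = l[j] := by rw [← hx']; exact List.getElem_take
        rw [hx2, ← getD_eq l j hjl]
        exact hle j hjl
      have hr : ∀ x ∈ l.drop (m + 1), x < l.getD m ' ' := by
        intro x hx
        obtain ⟨j, hj, hx'⟩ := List.getElem_of_mem hx
        have hjl : m + 1 + j < l.length := by
          have := hj; simp [List.length_drop] at this; omega
        have : x = l[m + 1 + j] := by
          rw [← hx']
          simp [List.getElem_drop]
        rw [this, ← getD_eq l (m + 1 + j) hjl]
        exact hlt (m + 1 + j) (by omega) hjl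
      have hdec := runB_decomp (l.take m) (l.getD m ' ') (l.drop (m + 1)) none ht hr
        (by intro b hb; cases hb)
      rw [hsplit] at hdec
      rw [pvLoopA]
      simp only [hpos, dif_pos, ← hmdef]
      rw [ih (l.take m) _ _ (by simp [List.length_take]; omega)]
      rw [hdec.1, hdec.2]
      simp

-- ===== VERDICT (by name: the statement is the Claim_ definition above) =====
theorem vratSlovo2_spec : Claim_equal_vratSlovo2 := by
  intro slovo _
  unfold Spec_vratSlovo2 vratSlovo2 vratSlovo2_alt
  rw [loopA_eq slovo.toList.length slovo.toList [] [] (le_refl _), foldB_eq]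
  simp
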